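-- pv_equiv track=rewrite | github.com/saert3311/aws-restart | Python Exercises 4/student_analyzer.py | group_grades_by_subject
-- ===== SOURCE A (Python) =====
-- def group_grades_by_subject(data: dict[str, dict]) -> dict[str, dict]:
--     grades_by_subject = {}
--     for student, grades in data.items():
--         for subject, grade in grades.items():
--             if subject not in grades_by_subject:
--                 grades_by_subject[subject] = {}
--             grades_by_subject[subject][student] = grade
--     return grades_by_subject
-- ===== SOURCE B (Python) =====
-- def group_grades_by_subject(data: dict[str, dict]) -> dict[str, dict]:
--     subjects = dict.fromkeys(subj for grades in data.values() for subj in grades)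
--     return {subj: {stu: grades[subj] for stu, grades in data.items() if subj in grades}
--             for subj in subjects}
-- ===== Notes on version B (the rewrite author's own statement) =====
-- stated objective: idiomatic
-- what changed: A builds the nested result in one student-major pass, incrementally inserting into per-subject dicts; B first collects the subjects in first-appearance order and then builds the result subject-major, one comprehension per subject scanning all students; Pre_ only excludes association lists with duplicate student or subject keys, which do not represent any Python dict (dict keys are unique), so no actual Python input is excluded.
import Mathlib
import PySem

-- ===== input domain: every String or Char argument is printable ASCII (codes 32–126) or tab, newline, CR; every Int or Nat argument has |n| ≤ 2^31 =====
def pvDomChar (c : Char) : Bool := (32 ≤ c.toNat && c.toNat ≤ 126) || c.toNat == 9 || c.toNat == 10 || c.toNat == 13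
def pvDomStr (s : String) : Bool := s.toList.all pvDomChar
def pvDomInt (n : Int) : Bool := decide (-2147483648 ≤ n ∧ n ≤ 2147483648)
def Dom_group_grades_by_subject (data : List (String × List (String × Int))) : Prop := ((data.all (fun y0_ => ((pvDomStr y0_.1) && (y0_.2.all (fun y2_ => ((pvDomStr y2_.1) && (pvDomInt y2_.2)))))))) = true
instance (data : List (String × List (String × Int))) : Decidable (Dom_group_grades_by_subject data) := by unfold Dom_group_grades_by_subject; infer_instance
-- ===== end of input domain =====

-- B replaces A's single student-major pass (building nested dicts incrementally) by a
-- subject-major rebuild: collect the subjects once in first-appearance order, then one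
-- comprehension per subject scanning the students; objective: idiomatic, same value.
-- (No argument is mutated; the equivalence is about the return value.)

-- ===== PORT A =====
-- literal transliteration of A: nested foldl over the dict items, guard-insert then modify
def group_grades_by_subject (data : List (String × List (String × Int))) : List (String × List (String × Int)) :=
  let gbs : PySem.Dict String (PySem.Dict String Int) :=
    data.foldl (fun acc sg =>
      sg.2.foldl (fun acc p =>
        let acc2 := if acc.contains p.1 then acc else acc.insert p.1 PySem.Dict.empty
        acc2.modify p.1 PySem.Dict.empty (fun d => d.insert sg.1 p.2)) acc)
      PySem.Dict.empty
  gbs.items.map (fun kv => (kv.1, kv.2.items))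

-- ===== PORT B =====
-- subjects = dict.fromkeys(subj for grades in data.values() for subj in grades)
def pvSubjects (data : List (String × List (String × Int))) : List String :=
  PySem.Set.ofList (data.flatMap (fun sg => sg.2.map Prod.fst))

-- {stu: grades[subj] for stu, grades in data.items() if subj in grades}
def pvColumn (data : List (String × List (String × Int))) (subj : String) : List (String × Int) :=
  data.filterMap (fun sg => ((PySem.Dict.mk sg.2).get? subj).map (fun g => (sg.1, g)))

def group_grades_by_subject_alt (data : List (String × List (String × Int))) : List (String × List (String × Int)) :=
  (pvSubjects data).map (fun subj => (subj, pvColumn data subj))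

-- ===== PRECONDITION & SPEC =====
-- Pre_ excludes association lists with a duplicated student key or a duplicated subject key
-- inside one grade dict: such lists do not represent any Python dict (dict keys are unique),
-- so neither program's value there is specified; A's overwrite-in-place and B's first-match
-- lookup resolve the accident differently.
def Pre_group_grades_by_subject (data : List (String × List (String × Int))) : Prop :=
  (data.map Prod.fst).Nodup ∧ ∀ sg ∈ data, (sg.2.map Prod.fst).Nodup
instance (data : List (String × List (String × Int))) : Decidable (Pre_group_grades_by_subject data) := by unfold Pre_group_grades_by_subject; infer_instance
def pvWitness_group_grades_by_subject : (List (String × List (String × Int))) :=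
  [("ann", [("math", 5), ("art", 3)]), ("bob", [("math", 4)])]
def Spec_group_grades_by_subject (data : List (String × List (String × Int))) (out : List (String × List (String × Int))) : Prop := out = group_grades_by_subject_alt data
instance (data : List (String × List (String × Int))) (out : List (String × List (String × Int))) : Decidable (Spec_group_grades_by_subject data out) := by unfold Spec_group_grades_by_subject; infer_instance

-- ===== CLAIM (what is proved, stated in full; the proofs are below) =====
def Claim_equal_group_grades_by_subject : Prop := ∀ (data : List (String × List (String × Int))), Dom_group_grades_by_subject data → Pre_group_grades_by_subject data → Spec_group_grades_by_subject data (group_grades_by_subject data)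

-- ===== LEMMAS AND PROOFS =====

-- A's inner loop over one student's grades, on a dict in "mapped" form.
theorem pv_inner_loop (s : String) (g : List (String × Int)) (S : List String)
    (f : String → List (String × Int))
    (hS : S.Nodup)
    (hg : (g.map Prod.fst).Nodup)
    (hs : ∀ subj ∈ g.map Prod.fst, s ∉ (f subj).map Prod.fst)
    (hf0 : ∀ subj, subj ∉ S → f subj = []) :
    g.foldl (fun acc p =>
        let acc2 := if acc.contains p.1 then acc
          else acc.insert p.1 (PySem.Dict.empty : PySem.Dict String Int)
        acc2.modify p.1 PySem.Dict.empty (fun d => d.insert s p.2))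
      (PySem.Dict.mk (S.map (fun subj => (subj, PySem.Dict.mk (f subj))))) =
    PySem.Dict.mk ((PySem.Set.update S (g.map Prod.fst)).map
      (fun subj => (subj, PySem.Dict.mk
        (f subj ++ (((PySem.Dict.mk g).get? subj).map (fun v => (s, v))).toList)))) := by
  induction g generalizing S f with
  | nil => simp [PySem.Set.update, PySem.Dict.get?]
  | cons p rest ih =>
    simp only [List.foldl_cons]
    simp only [List.map_cons, List.nodup_cons] at hg
    set D := PySem.Dict.mk (S.map (fun subj => (subj, PySem.Dict.mk (f subj)))) with hD
    have hkeys : D.keys = S := by simp [hD, PySem.Dict.keys, Function.comp_def]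
    have hcont : D.contains p.1 = decide (p.1 ∈ S) := by
      rw [PySem.Dict.contains_eq_decide_mem_keys, hkeys]
    set f' : String → List (String × Int) :=
      fun subj => if subj = p.1 then f p.1 ++ [(s, p.2)] else f subj with hf'
    have hnew : (PySem.Dict.mk (f p.1)).insert s p.2 = PySem.Dict.mk (f p.1 ++ [(s, p.2)]) := by
      rw [PySem.Dict.insert]
      have hsnot := hs p.1 (by simp)
      have : (PySem.Dict.mk (f p.1)).contains s = false := by
        rw [PySem.Dict.contains]
        simp only [List.any_eq_false]
        intro q hq he
        exact hsnot (List.mem_map.mpr ⟨q, hq, by simpa using he⟩)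
      rw [this]; simp
    have hstep :
        ((if D.contains p.1 then D
            else D.insert p.1 (PySem.Dict.empty : PySem.Dict String Int)).modify
          p.1 PySem.Dict.empty (fun d => d.insert s p.2)) =
        PySem.Dict.mk ((PySem.Set.add S p.1).map (fun subj => (subj, PySem.Dict.mk (f' subj)))) := by
      by_cases hp : p.1 ∈ S
      · simp only [hcont, hp, decide_true, if_true]
        have hget : D.getD p.1 PySem.Dict.empty = PySem.Dict.mk (f p.1) := by
          apply PySem.Dict.getD_of_mem_items
          · exact hD ▸ List.mem_map.mpr ⟨p.1, hp, rfl⟩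
          · rw [hkeys]; exact hS
        rw [PySem.Dict.modify, hget, hnew, PySem.Dict.insert, hcont]
        simp only [hp, decide_true, if_true]
        rw [PySem.Set.add_of_mem hp]
        apply PySem.Dict.ext
        simp only [hD, List.map_map]
        apply List.map_congr_left
        intro subj hsubj
        by_cases h : subj = p.1 <;> simp [h, Function.comp, hf']
      · simp only [hcont, hp, decide_false]
        have hins : D.insert p.1 (PySem.Dict.empty : PySem.Dict String Int) =
            PySem.Dict.mk ((S ++ [p.1]).map (fun subj => (subj, PySem.Dict.mk (f subj)))) := by
          rw [PySem.Dict.insert, hcont]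
          simp only [hp, decide_false]
          apply PySem.Dict.ext
          simp [hD, hf0 p.1 hp, PySem.Dict.empty]
        rw [hins]
        have hkeys2 : (PySem.Dict.mk ((S ++ [p.1]).map (fun subj => (subj, PySem.Dict.mk (f subj))))).keys
            = S ++ [p.1] := by simp [PySem.Dict.keys, Function.comp_def]
        have hget : (PySem.Dict.mk ((S ++ [p.1]).map (fun subj => (subj, PySem.Dict.mk (f subj))))).getD
            p.1 PySem.Dict.empty = PySem.Dict.mk (f p.1) := by
          apply PySem.Dict.getD_of_mem_items
          · exact List.mem_map.mpr ⟨p.1, by simp, rfl⟩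
          · rw [hkeys2]; simpa [List.nodup_append] using ⟨hS, fun a ha h => hp (h ▸ ha)⟩
        rw [PySem.Dict.modify]
        simp only [Bool.false_eq_true, if_false]
        rw [hget, hnew, PySem.Dict.insert, PySem.Dict.contains_eq_decide_mem_keys, hkeys2]
        simp only [List.mem_append, List.mem_singleton, or_true, decide_true, if_true]
        rw [PySem.Set.add_of_not_mem hp]
        apply PySem.Dict.ext
        simp only [List.map_map]
        apply List.map_congr_left
        intro subj hsubj
        by_cases h : subj = p.1 <;> simp [h, Function.comp, hf']
    rw [hstep]
    rw [ih (PySem.Set.add S p.1) f' (PySem.Set.nodup_add S p.1 hS) hg.2 ?hs' ?hf0']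
    case hs' =>
      intro subj hsubj
      have hne : subj ≠ p.1 := fun h => hg.1 (h ▸ hsubj)
      simp only [hf', hne, if_false]
      exact hs subj (by simp [hsubj])
    case hf0' =>
      intro subj hsubj
      rw [PySem.Set.mem_add] at hsubj
      push Not at hsubj
      simp only [hf', hsubj.2, if_false]
      exact hf0 subj hsubj.1
    -- final congruence: columns over rest vs over p :: rest
    rw [List.map_cons, PySem.Set.update_cons]
    apply PySem.Dict.ext
    apply List.map_congr_left
    intro subj hsubj
    by_cases h : subj = p.1
    · subst h
      have hnone : (PySem.Dict.mk rest).get? p.1 = none := by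
        rw [(PySem.Dict.get?_eq_none_iff_not_mem_keys _ _)]
        simpa [PySem.Dict.keys] using hg.1
      rw [PySem.Dict.get?_mk_cons]
      simp [hnone, hf']
    · have : (PySem.Dict.mk (p :: rest)).get? subj = (PySem.Dict.mk rest).get? subj := by
        rw [PySem.Dict.get?_mk_cons]
        simp [Ne.symm h]
      rw [this]
      simp [hf', h]

-- characterization of A's accumulator after the whole outer loop
theorem pv_outer (data : List (String × List (String × Int)))
    (hpre : Pre_group_grades_by_subject data) :
    (data.foldl (fun acc sg =>
      sg.2.foldl (fun acc p =>
        let acc2 := if acc.contains p.1 then acc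
          else acc.insert p.1 (PySem.Dict.empty : PySem.Dict String Int)
        acc2.modify p.1 PySem.Dict.empty (fun d => d.insert sg.1 p.2)) acc)
      PySem.Dict.empty) =
    PySem.Dict.mk ((pvSubjects data).map
      (fun subj => (subj, PySem.Dict.mk (pvColumn data subj)))) := by
  induction data using List.reverseRecOn with
  | nil => rfl
  | append_singleton data sg ih =>
    obtain ⟨h1, h2⟩ := hpre
    have hpre' : Pre_group_grades_by_subject data := ⟨by simpa using List.Nodup.sublist (by simp) h1, fun x hx => h2 x (by simp [hx])⟩
    rw [List.foldl_append, ih hpre']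
    simp only [List.foldl_cons, List.foldl_nil]
    rw [pv_inner_loop sg.1 sg.2 (pvSubjects data) (pvColumn data)
      (PySem.Set.nodup_ofList _)
      (h2 sg (by simp))
      ?hs ?hf0]
    · have hsubj : pvSubjects (data ++ [sg]) =
          PySem.Set.update (pvSubjects data) (sg.2.map Prod.fst) := by
        unfold pvSubjects
        rw [List.flatMap_append, PySem.Set.ofList_append]
        simp
      rw [hsubj]
      apply PySem.Dict.ext
      apply List.map_congr_left
      intro subj _
      have hcol : pvColumn (data ++ [sg]) subj = pvColumn data subj ++
          (((PySem.Dict.mk sg.2).get? subj).map (fun v => (sg.1, v))).toList := by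
        unfold pvColumn
        rw [List.filterMap_append]
        cases h : (PySem.Dict.mk sg.2).get? subj <;> simp [h]
      rw [hcol]
    case hs =>
      intro subj _ hmem
      have hfresh : sg.1 ∉ data.map Prod.fst := by
        rw [List.map_append] at h1
        have hd := List.nodup_append.mp h1
        intro hmem2
        exact hd.2.2 sg.1 hmem2 sg.1 (by simp) rfl
      unfold pvColumn at hmem
      simp only [List.map_filterMap, List.mem_filterMap, Option.map_map] at hmem
      obtain ⟨x, hx, he⟩ := hmem
      cases h : (PySem.Dict.mk x.2).get? subj with
      | none => rw [h] at he; simp at he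
      | some v =>
        rw [h] at he
        simp at he
        exact hfresh (he ▸ List.mem_map_of_mem hx)
    case hf0 =>
      intro subj hsubj
      unfold pvColumn
      rw [List.filterMap_eq_nil_iff]
      intro x hx
      unfold pvSubjects at hsubj
      rw [PySem.Set.mem_ofList] at hsubj
      have : subj ∉ x.2.map Prod.fst := fun hm => hsubj (List.mem_flatMap.mpr ⟨x, hx, hm⟩)
      rw [(PySem.Dict.get?_eq_none_iff_not_mem_keys _ _).mpr (by simpa [PySem.Dict.keys] using this)]
      rfl


-- ===== VERDICT (by name: the statement is the Claim_ definition above) =====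
theorem group_grades_by_subject_spec : Claim_equal_group_grades_by_subject := by
  intro data _ hpre
  unfold Spec_group_grades_by_subject group_grades_by_subject group_grades_by_subject_alt
  rw [pv_outer data hpre]
  simp [List.map_map, Function.comp]
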